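-- pv_equiv track=rewrite | github.com/rishabhgoel0213/ZeroClone | ValueNetMCTS/chess.py | game_winner
-- ===== SOURCE A (Python) =====
-- def game_winner(board):
--     has_white = any(piece == 'K' for row in board for piece in row)
--     has_black = any(piece == 'k' for row in board for piece in row)
--     if not has_black:
--         return 'White'
--     if not has_white:
--         return 'Black'
--     return None
-- ===== SOURCE B (Python) =====
-- def game_winner(board):
--     saw_K = saw_k = False
--     for row in board:
--         for p in row:
--             saw_K = saw_K or p == 'K'
--             saw_k = saw_k or p == 'k'
--             if saw_K and saw_k:
--                 return None
--     return 'White' if not saw_k else 'Black'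
-- ===== Notes on version B (the rewrite author's own statement) =====
-- stated objective: alternative
-- what changed: Replaces A's two independent full any-scans with one single pass over the board that maintains both king flags in an accumulator and returns None early as soon as both kings have been seen; the final answer falls out of the flags (no k seen -> White, else -> Black) with no second traversal.
import Mathlib
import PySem

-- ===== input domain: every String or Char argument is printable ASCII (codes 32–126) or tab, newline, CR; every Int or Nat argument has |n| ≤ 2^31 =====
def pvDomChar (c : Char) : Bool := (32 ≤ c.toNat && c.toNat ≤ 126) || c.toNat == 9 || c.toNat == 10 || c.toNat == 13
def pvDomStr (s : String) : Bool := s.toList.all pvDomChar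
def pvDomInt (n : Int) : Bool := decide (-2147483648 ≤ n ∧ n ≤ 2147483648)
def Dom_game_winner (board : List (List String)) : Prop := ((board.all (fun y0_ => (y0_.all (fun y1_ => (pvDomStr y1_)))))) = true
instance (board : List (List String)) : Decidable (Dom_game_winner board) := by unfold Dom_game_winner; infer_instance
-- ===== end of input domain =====

-- B replaces A's two independent any-scans by ONE pass carrying both king flags, with an
-- early None-return as soon as both kings are seen (objective: alternative decomposition).

-- ===== PORT A =====
def game_winner (board : List (List String)) : Option String :=
  let has_white := board.any (fun row => row.any (fun piece => piece == "K"))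
  let has_black := board.any (fun row => row.any (fun piece => piece == "k"))
  if !has_black then some "White"
  else if !has_white then some "Black"
  else none

-- ===== PORT B =====
-- inner loop of Source B over one row: updates the two flags, early-exits with none when both set
def gwRowLoop : List String → Bool → Bool → Option (Bool × Bool)
  | [], sawK, sawk => some (sawK, sawk)
  | p :: rest, sawK, sawk =>
    let sawK' := sawK || p == "K"
    let sawk' := sawk || p == "k"
    if sawK' && sawk' then none else gwRowLoop rest sawK' sawk'

-- outer loop of Source B over the rows
def gwLoop : List (List String) → Bool → Bool → Option String
  | [], _, sawk => if !sawk then some "White" else some "Black"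
  | row :: rest, sawK, sawk =>
    match gwRowLoop row sawK sawk with
    | none => none
    | some (sawK', sawk') => gwLoop rest sawK' sawk'

def game_winner_alt (board : List (List String)) : Option String :=
  gwLoop board false false

-- ===== PRECONDITION & SPEC =====
def Spec_game_winner (board : List (List String)) (out : Option String) : Prop := out = game_winner_alt board
instance (board : List (List String)) (out : Option String) : Decidable (Spec_game_winner board out) := by unfold Spec_game_winner; infer_instance

-- ===== CLAIM (what is proved, stated in full; the proofs are below) =====
def Claim_equal_game_winner : Prop := ∀ (board : List (List String)), Dom_game_winner board → Spec_game_winner board (game_winner board)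

-- ===== LEMMAS AND PROOFS =====

-- characterisation of the inner loop, assuming the flags are not both set on entry
theorem gwRowLoop_spec (row : List String) (K k : Bool) (h : (K && k) = false) :
    gwRowLoop row K k =
      (if (K || row.any (fun p => p == "K")) && (k || row.any (fun p => p == "k"))
       then none
       else some (K || row.any (fun p => p == "K"), k || row.any (fun p => p == "k"))) := by
  induction row generalizing K k with
  | nil => simp [gwRowLoop, h]
  | cons p rest ih =>
    simp only [gwRowLoop, List.any_cons, ← Bool.or_assoc]
    cases hb : ((K || p == "K") && (k || p == "k")) with
    | true =>
      rcases Bool.and_eq_true _ _ |>.mp hb with ⟨h1, h2⟩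
      simp [h1, h2]
    | false =>
      rw [if_neg (by simp), ih _ _ hb]

-- characterisation of the outer loop
theorem gwLoop_spec (rows : List (List String)) (K k : Bool) (h : (K && k) = false) :
    gwLoop rows K k =
      (if (K || rows.any (fun row => row.any (fun p => p == "K")))
          && (k || rows.any (fun row => row.any (fun p => p == "k")))
       then none
       else if !(k || rows.any (fun row => row.any (fun p => p == "k")))
       then some "White" else some "Black") := by
  induction rows generalizing K k with
  | nil => simp [gwLoop, h]
  | cons row rest ih =>
    simp only [gwLoop, List.any_cons, ← Bool.or_assoc]
    rw [gwRowLoop_spec row K k h]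
    cases hb : ((K || row.any (fun p => p == "K")) && (k || row.any (fun p => p == "k"))) with
    | true =>
      rcases Bool.and_eq_true _ _ |>.mp hb with ⟨h1, h2⟩
      simp [h1, h2]
    | false =>
      rw [if_neg (by simp)]
      show gwLoop rest _ _ = _
      rw [ih _ _ hb]

-- ===== VERDICT (by name: the statement is the Claim_ definition above) =====
theorem game_winner_spec : Claim_equal_game_winner := by
  intro board _
  unfold Spec_game_winner game_winner game_winner_alt
  rw [gwLoop_spec board false false rfl]
  cases hk : (board.any (fun row => row.any (fun p => p == "k"))) <;>
    cases hK : (board.any (fun row => row.any (fun p => p == "K"))) <;>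
    simp_all
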